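-- pv_equiv track=rewrite | github.com/2024-fall-cs475-project-team-10/SSD-based-offloading-solution | utils/__init__.py | _device_mapping_llama
-- ===== SOURCE A (Python) =====
-- from typing import List, Dict
--
-- def _device_mapping_llama(max_layers: int, skipped_attn_layers: List[int], skipped_mlp_layers: List[int]):
--     device_map_cuda = ["model.embed_tokens"]
--     device_map_auto = []
--     for i in range(max_layers):
--         device_map_cuda.append(f"model.layers.{i}.input_layernorm")
--         if i in skipped_attn_layers:
--             device_map_auto.append(f"model.layers.{i}.self_attn")
--         else:
--             device_map_cuda.append(f"model.layers.{i}.self_attn")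
--         device_map_cuda.append(f"model.layers.{i}.post_attention_layernorm")
--         if i in skipped_mlp_layers:
--             device_map_auto.append(f"model.layers.{i}.mlp")
--         else:
--             device_map_cuda.append(f"model.layers.{i}.mlp")
--     device_map_cuda.append("model.norm")
--     device_map_cuda.append("lm_head")
--     return device_map_cuda, device_map_auto
-- ===== SOURCE B (Python) =====
-- def _device_mapping_llama(max_layers, skipped_attn_layers, skipped_mlp_layers):
--     # Build one ordered (name, device) table, then derive both lists by filtering.
--     table = [("model.embed_tokens", "cuda")]
--     for i in range(max_layers):
--         table.append((f"model.layers.{i}.input_layernorm", "cuda"))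
--         table.append((f"model.layers.{i}.self_attn",
--                       "auto" if i in skipped_attn_layers else "cuda"))
--         table.append((f"model.layers.{i}.post_attention_layernorm", "cuda"))
--         table.append((f"model.layers.{i}.mlp",
--                       "auto" if i in skipped_mlp_layers else "cuda"))
--     table.append(("model.norm", "cuda"))
--     table.append(("lm_head", "cuda"))
--     return [n for n, d in table if d == "cuda"], [n for n, d in table if d == "auto"]
-- ===== Notes on version B (the rewrite author's own statement) =====
-- stated objective: alternative
-- what changed: Replaces the interleaved two-list build with a build-one-(name,device)-table-then-partition decomposition: the table is built in one loop and the two result lists are obtained by two stable filter passes over it.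
import Mathlib
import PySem

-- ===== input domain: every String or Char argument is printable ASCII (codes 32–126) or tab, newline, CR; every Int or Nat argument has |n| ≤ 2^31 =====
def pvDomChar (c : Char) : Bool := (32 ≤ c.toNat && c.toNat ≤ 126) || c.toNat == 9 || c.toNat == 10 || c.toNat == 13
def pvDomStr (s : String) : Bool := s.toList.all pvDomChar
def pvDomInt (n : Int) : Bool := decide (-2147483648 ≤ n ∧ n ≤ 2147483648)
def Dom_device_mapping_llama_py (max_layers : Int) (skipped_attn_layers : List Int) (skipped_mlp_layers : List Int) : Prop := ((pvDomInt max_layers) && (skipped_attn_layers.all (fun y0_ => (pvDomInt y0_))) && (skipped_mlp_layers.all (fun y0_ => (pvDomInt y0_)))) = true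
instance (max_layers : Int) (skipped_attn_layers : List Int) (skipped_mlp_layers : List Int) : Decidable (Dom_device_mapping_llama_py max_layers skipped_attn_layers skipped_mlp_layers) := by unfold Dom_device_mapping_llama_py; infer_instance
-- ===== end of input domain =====

-- B builds one ordered (name, device) table and partitions it by two filter passes,
-- instead of A's interleaved append-to-two-lists loop; objective: alternative decomposition.

-- ===== PORT A =====
-- f"model.layers.{i}.<suffix>"
def pvLayerName (i : Int) (suffix : String) : String :=
  "model.layers." ++ PySem.Int.toStr i ++ "." ++ suffix

-- one iteration of A's loop body over the pair (device_map_cuda, device_map_auto)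
def pvStepA (skipped_attn_layers skipped_mlp_layers : List Int)
    (s : List String × List String) (i : Int) : List String × List String :=
  let s1 : List String × List String := (s.1 ++ [pvLayerName i "input_layernorm"], s.2)
  let s2 : List String × List String :=
    if skipped_attn_layers.contains i then (s1.1, s1.2 ++ [pvLayerName i "self_attn"])
    else (s1.1 ++ [pvLayerName i "self_attn"], s1.2)
  let s3 : List String × List String := (s2.1 ++ [pvLayerName i "post_attention_layernorm"], s2.2)
  if skipped_mlp_layers.contains i then (s3.1, s3.2 ++ [pvLayerName i "mlp"])
  else (s3.1 ++ [pvLayerName i "mlp"], s3.2)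

def device_mapping_llama_py (max_layers : Int) (skipped_attn_layers : List Int) (skipped_mlp_layers : List Int) : List String × List String :=
  let init : List String × List String := (["model.embed_tokens"], [])
  let s := (PySem.List.pyRange 0 max_layers 1).foldl (pvStepA skipped_attn_layers skipped_mlp_layers) init
  (s.1 ++ ["model.norm"] ++ ["lm_head"], s.2)

-- ===== PORT B =====
-- the four table rows B appends for layer i
def pvRowB (skipped_attn_layers skipped_mlp_layers : List Int) (i : Int) : List (String × String) :=
  [(pvLayerName i "input_layernorm", "cuda"),
   (pvLayerName i "self_attn", if skipped_attn_layers.contains i then "auto" else "cuda"),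
   (pvLayerName i "post_attention_layernorm", "cuda"),
   (pvLayerName i "mlp", if skipped_mlp_layers.contains i then "auto" else "cuda")]

def device_mapping_llama_py_alt (max_layers : Int) (skipped_attn_layers : List Int) (skipped_mlp_layers : List Int) : List String × List String :=
  let table : List (String × String) :=
    (PySem.List.pyRange 0 max_layers 1).foldl
      (fun t i => t ++ pvRowB skipped_attn_layers skipped_mlp_layers i)
      [("model.embed_tokens", "cuda")]
    ++ [("model.norm", "cuda"), ("lm_head", "cuda")]
  ((table.filter (fun p => p.2 == "cuda")).map Prod.fst,
   (table.filter (fun p => p.2 == "auto")).map Prod.fst)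

-- ===== PRECONDITION & SPEC =====
def Spec_device_mapping_llama_py (max_layers : Int) (skipped_attn_layers : List Int) (skipped_mlp_layers : List Int) (out : List String × List String) : Prop := out = device_mapping_llama_py_alt max_layers skipped_attn_layers skipped_mlp_layers
instance (max_layers : Int) (skipped_attn_layers : List Int) (skipped_mlp_layers : List Int) (out : List String × List String) : Decidable (Spec_device_mapping_llama_py max_layers skipped_attn_layers skipped_mlp_layers out) := by unfold Spec_device_mapping_llama_py; infer_instance

-- ===== CLAIM (what is proved, stated in full; the proofs are below) =====
def Claim_equal_device_mapping_llama_py : Prop := ∀ (max_layers : Int) (skipped_attn_layers : List Int) (skipped_mlp_layers : List Int), Dom_device_mapping_llama_py max_layers skipped_attn_layers skipped_mlp_layers → Spec_device_mapping_llama_py max_layers skipped_attn_layers skipped_mlp_layers (device_mapping_llama_py max_layers skipped_attn_layers skipped_mlp_layers)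

-- ===== LEMMAS AND PROOFS =====

-- A's loop over any index list equals "append the cuda/auto projections of B's rows".
theorem pvFoldA_eq (sa sm : List Int) (L : List Int) (c a : List String) :
    L.foldl (pvStepA sa sm) (c, a)
      = (c ++ ((L.flatMap (pvRowB sa sm)).filter (fun p => p.2 == "cuda")).map Prod.fst,
         a ++ ((L.flatMap (pvRowB sa sm)).filter (fun p => p.2 == "auto")).map Prod.fst) := by
  induction L generalizing c a with
  | nil => simp
  | cons i L ih =>
    simp only [List.foldl_cons, List.flatMap_cons]
    rw [show (pvStepA sa sm (c, a) i) =
        (c ++ ((pvRowB sa sm i).filter (fun p => p.2 == "cuda")).map Prod.fst,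
         a ++ ((pvRowB sa sm i).filter (fun p => p.2 == "auto")).map Prod.fst) from ?_]
    · rw [ih]; simp [List.filter_append, List.append_assoc]
    · simp only [pvStepA, pvRowB]
      by_cases h1 : i ∈ sa <;> by_cases h2 : i ∈ sm <;>
        simp [h1, h2, List.append_assoc]

-- B's table-building loop is the flatMap of its rows.
theorem pvTable_eq (sa sm : List Int) (L : List Int) (t : List (String × String)) :
    L.foldl (fun t i => t ++ pvRowB sa sm i) t = t ++ L.flatMap (pvRowB sa sm) := by
  induction L generalizing t with
  | nil => simp
  | cons i L ih => simp [ih, List.append_assoc]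

-- ===== VERDICT (by name: the statement is the Claim_ definition above) =====
theorem device_mapping_llama_py_spec : Claim_equal_device_mapping_llama_py := by
  intro n sa sm _
  unfold Spec_device_mapping_llama_py device_mapping_llama_py device_mapping_llama_py_alt
  simp only [pvTable_eq, pvFoldA_eq]
  simp [List.filter_append, List.append_assoc]
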